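-- pv_equiv track=rewrite | github.com/LarisaOvchinnikova/python_codewars | Simple Fun 17 Rounders.py | rounders
-- ===== SOURCE A (Python) =====
-- def rounders(value):
--     value = list(str(value))
--     value = [int(el) for el in value]
--     for i in range(len(value)-1, 0, -1):
--         if value[i] >= 5:
--             value[i-1] += 1
--         value[i] = 0
--     return int("".join(list(map(str,value))))
-- ===== SOURCE B (Python) =====
-- def rounders(value):
--     n = value
--     p = 10
--     for _ in range(len(str(value)) - 1):
--         n = (n + p // 2) // p * p
--         p *= 10
--     return n
-- ===== Notes on version B (the rewrite author's own statement) =====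
-- stated objective: simpler
-- what changed: Replaces the digit-list mutation with manual carries and the str-join-int reassembly by a pure integer loop that rounds half-up at successively larger powers of ten.
import Mathlib
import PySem

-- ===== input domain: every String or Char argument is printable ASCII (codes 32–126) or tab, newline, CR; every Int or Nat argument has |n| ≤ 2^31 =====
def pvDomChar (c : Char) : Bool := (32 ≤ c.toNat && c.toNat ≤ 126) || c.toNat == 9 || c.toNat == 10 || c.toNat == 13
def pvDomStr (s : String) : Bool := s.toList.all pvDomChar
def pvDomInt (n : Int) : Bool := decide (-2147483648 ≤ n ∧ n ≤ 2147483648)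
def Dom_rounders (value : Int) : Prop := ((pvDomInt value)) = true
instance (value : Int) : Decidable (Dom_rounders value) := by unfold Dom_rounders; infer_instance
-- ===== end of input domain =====

-- B replaces A's digit-list mutation with manual carries (and the str/join/int
-- reassembly) by a pure integer loop that rounds half-up at successively larger
-- powers of ten; objective: simpler.

-- ===== PORT A =====
-- one iteration of A's for-loop body (index i of the digit list)
def roundStep (v : List Int) (i : Int) : List Int :=
  let v' := if 5 ≤ PySem.List.pyGetD v i 0
            then PySem.List.pySetD v (i-1) (PySem.List.pyGetD v (i-1) 0 + 1)
            else v
  PySem.List.pySetD v' i 0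

def rounders (value : Int) : Int :=
  -- value = [int(el) for el in list(str(value))]  (int(el) on a 1-char string = ofChars? [c])
  let ds0 : List Int :=
    (PySem.Int.toStr value).toList.map (fun c => (PySem.Int.ofChars? [c]).getD 0)
  -- for i in range(len(value)-1, 0, -1): …
  let ds : List Int :=
    (PySem.List.pyRange ((ds0.length : Int) - 1) 0 (-1)).foldl roundStep ds0
  -- int("".join(list(map(str, value))))  (never raises under Pre_, hence .getD 0)
  (PySem.Int.ofChars? (PySem.Chars.join [] (ds.map (fun d => PySem.Int.toChars d)))).getD 0

-- ===== PORT B =====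
-- one iteration of B's loop body: n = (n + p // 2) // p * p; p *= 10
def roundAt (st : Int × Int) : Int × Int :=
  (PySem.Int.floordiv (st.1 + PySem.Int.floordiv st.2 2) st.2 * st.2, st.2 * 10)

def rounders_alt (value : Int) : Int :=
  ((PySem.List.pyRange 0 ((PySem.Str.len (PySem.Int.toStr value)) - 1) 1).foldl
    (fun st _ => roundAt st) (value, 10)).1

-- ===== PRECONDITION & SPEC =====
-- A raises ValueError on every negative value (int('-') on the sign character).
def Pre_rounders (value : Int) : Prop := 0 ≤ value
instance (value : Int) : Decidable (Pre_rounders value) := by unfold Pre_rounders; infer_instance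
def pvWitness_rounders : Int := 45

def Spec_rounders (value : Int) (out : Int) : Prop := out = rounders_alt value
instance (value : Int) (out : Int) : Decidable (Spec_rounders value out) := by unfold Spec_rounders; infer_instance

-- ===== CLAIM (what is proved, stated in full; the proofs are below) =====
def Claim_equal_rounders : Prop := ∀ (value : Int), Dom_rounders value → Pre_rounders value → Spec_rounders value (rounders value)

-- ===== LEMMAS AND PROOFS =====

-- the ten decimal digit characters
def digitChars : List Char := ['0','1','2','3','4','5','6','7','8','9']

-- integer value of a list of digit characters, resp. of a list of digits
def valC (cs : List Char) : Int := cs.foldl (fun a c => 10*a + ((c.toNat : Int) - 48)) 0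
def valI (ds : List Int) : Int := ds.foldl (fun a d => 10*a + d) 0

-- carry produced by A's cascade on a digit suffix
def carry : List Int → Int
  | [] => 0
  | d :: t => if 5 ≤ d + carry t then 1 else 0

lemma carry_cases (t : List Int) : carry t = 0 ∨ carry t = 1 := by
  cases t with
  | nil => left; rfl
  | cons d t => unfold carry; split_ifs <;> simp

lemma valI_append_singleton (xs : List Int) (d : Int) : valI (xs ++ [d]) = 10 * valI xs + d := by
  simp [valI, List.foldl_append]

lemma valC_append_singleton (xs : List Char) (c : Char) :
    valC (xs ++ [c]) = 10 * valC xs + ((c.toNat : Int) - 48) := by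
  simp [valC, List.foldl_append]

-- digit characters produced by Nat.digitChar
lemma digitChar_spec (m : Nat) (h : m < 10) :
    m.digitChar ∈ digitChars ∧ ((m.digitChar.toNat : Int) - 48) = (m : Int) := by
  interval_cases m <;> exact ⟨by decide, by decide⟩

-- characterisation of Nat.toDigitsCore with enough fuel
lemma toDigitsCore_spec :
    ∀ (fuel n : Nat) (acc : List Char), n < fuel →
      ∃ pre, Nat.toDigitsCore 10 fuel n acc = pre ++ acc ∧ pre ≠ [] ∧
        (∀ c ∈ pre, c ∈ digitChars) ∧ valC pre = (n : Int) := by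
  intro fuel
  induction fuel with
  | zero => intro n acc h; omega
  | succ f ih =>
    intro n acc h
    obtain ⟨hdmem, hdval⟩ := digitChar_spec (n % 10) (Nat.mod_lt _ (by norm_num))
    by_cases h0 : n / 10 = 0
    · refine ⟨[(n % 10).digitChar], ?_, by simp, ?_, ?_⟩
      · simp only [Nat.toDigitsCore, h0]; simp
      · intro c hc; simp at hc; subst hc; exact hdmem
      · have hn : n % 10 = n := by omega
        simp only [valC, List.foldl_cons, List.foldl_nil]
        rw [hn] at hdval
        rw [hn, hdval]
        omega
    · have hrec : Nat.toDigitsCore 10 (f+1) n acc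
          = Nat.toDigitsCore 10 f (n / 10) ((n % 10).digitChar :: acc) := by
        simp only [Nat.toDigitsCore, h0]; simp
      have hlt : n / 10 < f := by omega
      obtain ⟨pre, hpre, hne, hmem, hval⟩ := ih (n / 10) ((n % 10).digitChar :: acc) hlt
      refine ⟨pre ++ [(n % 10).digitChar], ?_, by simp, ?_, ?_⟩
      · rw [hrec, hpre]; simp
      · intro c hc
        rcases List.mem_append.1 hc with h1 | h1
        · exact hmem c h1
        · simp at h1; subst h1; exact hdmem
      · rw [valC_append_singleton, hval, hdval]
        push_cast
        omega

-- the digit list A extracts from str(value), for 0 ≤ value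
lemma toChars_spec (value : Int) (h : 0 ≤ value) :
    ∃ pre, PySem.Int.toChars value = pre ∧ pre ≠ [] ∧
      (∀ c ∈ pre, c ∈ digitChars) ∧ valC pre = value := by
  obtain ⟨pre, hpre, hne, hmem, hval⟩ :=
    toDigitsCore_spec (value.toNat + 1) value.toNat [] (by omega)
  refine ⟨pre, ?_, hne, hmem, ?_⟩
  · have : ¬ value < 0 := by omega
    simp only [PySem.Int.toChars, if_neg this]
    simpa [Nat.toDigits] using hpre
  · rw [hval, Int.toNat_of_nonneg h]

-- int(c) for a single digit character
lemma ofChars_digit (c : Char) (h : c ∈ digitChars) :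
    (PySem.Int.ofChars? [c]).getD 0 = ((c.toNat : Int) - 48) := by
  fin_cases h <;> decide

-- value and bounds of the int digit list
lemma valI_map_eq_valC (cs : List Char) (h : ∀ c ∈ cs, c ∈ digitChars) :
    valI (cs.map (fun c => (PySem.Int.ofChars? [c]).getD 0)) = valC cs := by
  unfold valI valC
  rw [List.foldl_map]
  exact PySem.List.foldl_congr_mem cs _ _ 0 (fun a c hc => by rw [ofChars_digit c (h c hc)])

lemma digit_bounds (c : Char) (h : c ∈ digitChars) :
    0 ≤ ((c.toNat : Int) - 48) ∧ ((c.toNat : Int) - 48) ≤ 9 := by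
  fin_cases h <;> exact ⟨by decide, by decide⟩

-- ----- A's loop -----

lemma pyGetD_cons_of_pos {x : Int} {xs : List Int} {i d : Int} (h : 1 ≤ i) :
    PySem.List.pyGetD (x :: xs) i d = PySem.List.pyGetD xs (i-1) d := by
  rw [PySem.List.pyGetD_of_nonneg _ _ (by omega), PySem.List.pyGetD_of_nonneg _ _ (by omega)]
  have hi : i.toNat = (i-1).toNat + 1 := by omega
  rw [hi, List.getD_cons_succ]

lemma pySetD_cons_of_pos {x : Int} {xs : List Int} {i v : Int} (h : 1 ≤ i) :
    PySem.List.pySetD (x :: xs) i v = x :: PySem.List.pySetD xs (i-1) v := by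
  rw [PySem.List.pySetD_of_nonneg _ _ (by omega), PySem.List.pySetD_of_nonneg _ _ (by omega)]
  have hi : i.toNat = (i-1).toNat + 1 := by omega
  rw [hi, List.set_cons_succ]

lemma roundStep_cons {x : Int} {xs : List Int} {i : Int} (h : 2 ≤ i) :
    roundStep (x :: xs) i = x :: roundStep xs (i-1) := by
  unfold roundStep
  rw [pyGetD_cons_of_pos (by omega), pyGetD_cons_of_pos (by omega)]
  have : i - 1 - 1 = i - 2 := by ring
  split_ifs with hc
  · rw [pySetD_cons_of_pos (by omega), pySetD_cons_of_pos (by omega)]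
  · rw [pySetD_cons_of_pos (by omega)]

lemma foldl_roundStep_shift :
    ∀ (I : List Int), (∀ i ∈ I, 2 ≤ i) → ∀ (x : Int) (xs : List Int),
      I.foldl roundStep (x :: xs) = x :: (I.map (· - 1)).foldl roundStep xs := by
  intro I
  induction I with
  | nil => intro _ x xs; simp
  | cons i t ih =>
    intro hmem x xs
    simp only [List.foldl_cons, List.map_cons]
    rw [roundStep_cons (hmem i (by simp)), ih (fun j hj => hmem j (by simp [hj]))]

lemma map_sub_one_pyRange (a b : Int) :
    (PySem.List.pyRange a b (-1)).map (· - 1) = PySem.List.pyRange (a-1) (b-1) (-1) := by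
  rw [PySem.List.pyRange_neg_one, PySem.List.pyRange_neg_one, List.map_map]
  have h1 : (a - b).toNat = (a - 1 - (b - 1)).toNat := by omega
  rw [← h1]
  apply List.map_congr_left
  intro k _
  simp
  omega

lemma pyRange_split_last (k : Int) (h : 1 ≤ k) :
    PySem.List.pyRange k 0 (-1) = PySem.List.pyRange k 1 (-1) ++ [1] := by
  rw [PySem.List.pyRange_neg_one_eq_reverse, PySem.List.pyRange_neg_one_eq_reverse]
  have h1 : (0:Int) + 1 = 1 := by norm_num
  have h2 : (1:Int) + 1 = 2 := by norm_num
  rw [h1, h2, PySem.List.pyRange_one_cons (by omega : (1:Int) < k + 1)]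
  simp

lemma roundStep_two (a b : Int) (zs : List Int) :
    roundStep (a :: b :: zs) 1 = (if 5 ≤ b then a + 1 else a) :: 0 :: zs := by
  unfold roundStep
  norm_num [PySem.List.pyGetD_of_nonneg, PySem.List.pySetD_of_nonneg]
  split_ifs <;> rfl

lemma loopA_spec :
    ∀ (t : List Int) (d0 : Int),
      (PySem.List.pyRange ((t.length : Int)) 0 (-1)).foldl roundStep (d0 :: t)
        = (d0 + carry t) :: List.replicate t.length 0 := by
  intro t
  induction t with
  | nil =>
    intro d0
    rw [show ((([]:List Int).length : Int)) = 0 by simp]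
    rw [PySem.List.pyRange_neg_one_eq_nil (by omega)]
    simp [carry]
  | cons d1 t' ih =>
    intro d0
    have hk : (1:Int) ≤ ((d1 :: t').length : Int) := by
      simp only [List.length_cons]; omega
    rw [pyRange_split_last _ hk, List.foldl_append]
    rw [foldl_roundStep_shift _ (fun i hi => by
          rw [PySem.List.mem_pyRange_neg_one] at hi; omega)]
    rw [map_sub_one_pyRange]
    have : ((d1 :: t').length : Int) - 1 = (t'.length : Int) := by
      simp only [List.length_cons]; omega
    rw [this]
    have h0 : (1:Int) - 1 = 0 := by ring
    rw [h0, ih d1]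
    -- last iteration: i = 1
    simp only [List.foldl_cons, List.foldl_nil]
    rw [roundStep_two]
    show _ = (d0 + carry (d1 :: t')) :: List.replicate (t'.length + 1) 0
    rw [List.replicate_succ]
    have hc : carry (d1 :: t') = if 5 ≤ d1 + carry t' then 1 else 0 := rfl
    rw [hc]
    split_ifs <;> simp

-- ----- the final int("".join(...)) of A -----

lemma intercalate_nil_flatten (cs : List (List Char)) : List.intercalate [] cs = cs.flatten := by
  unfold List.intercalate
  induction cs with
  | nil => rfl
  | cons h t ih =>
    cases t with
    | nil => simp
    | cons a b => simp_all [List.intersperse]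

lemma flatten_replicate_zero (k : Nat) :
    ((List.replicate k (0:Int)).map (fun d => PySem.Int.toChars d)).flatten = List.replicate k '0' := by
  induction k with
  | zero => rfl
  | succ n ih => simp only [List.replicate_succ, List.map_cons, List.flatten_cons, ih]; rfl

lemma parse_head_zeros (m : Int) (k : Nat) (h0 : 0 ≤ m) (h10 : m ≤ 10) (hk : k ≤ 9) :
    PySem.Int.ofChars? (PySem.Int.toChars m ++ List.replicate k '0') = some (m * 10 ^ k) := by
  interval_cases m <;> interval_cases k <;> decide

-- ----- B's loop -----

lemma foldl_ignore_index {α β : Type} (f : α → α) :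
    ∀ (l : List β) (init : α), l.foldl (fun st _ => f st) init = f^[l.length] init := by
  intro l
  induction l with
  | nil => intro init; simp
  | cons x t ih => intro init; simp [ih, Function.iterate_succ_apply]

lemma carry_bounds (t : List Int) : 0 ≤ carry t ∧ carry t ≤ 1 := by
  rcases carry_cases t with h | h <;> rw [h] <;> norm_num

lemma loopB_inv (ds : List Int) (hd : ∀ d ∈ ds, 0 ≤ d ∧ d ≤ 9) :
    ∀ j, j + 1 ≤ ds.length →
      roundAt^[j] (valI ds, 10)
        = ((valI (ds.take (ds.length - j)) + carry (ds.drop (ds.length - j))) * 10 ^ j,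
           10 ^ (j+1)) := by
  intro j
  induction j with
  | zero =>
    intro hj
    simp only [Function.iterate_zero, id_eq, Nat.sub_zero, List.take_length, List.drop_length]
    show _ = ((valI ds + carry []) * 10 ^ 0, 10 ^ 1)
    simp [carry]
  | succ j ih =>
    intro hj
    have hmlt : ds.length - j - 1 < ds.length := by omega
    set m : Nat := ds.length - j with hm
    have hm2 : 2 ≤ m := by omega
    rw [Function.iterate_succ_apply', ih (by omega)]
    -- decompose take m = take (m-1) ++ [ds[m-1]]
    have htk : ds.take m = ds.take (m-1) ++ [ds[m-1]] := by
      conv_lhs => rw [show m = (m-1)+1 by omega, List.take_add_one]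
      rw [List.getElem?_eq_getElem hmlt]
      rfl
    have hdr : ds.drop (m-1) = ds[m-1] :: ds.drop m := by
      have h1 := List.drop_eq_getElem_cons hmlt
      have : m - 1 + 1 = m := by omega
      rwa [this] at h1
    set r : Int := ds[m-1] with hr
    obtain ⟨hr0, hr9⟩ := hd r (List.getElem_mem hmlt)
    set c : Int := carry (ds.drop m) with hcdef
    obtain ⟨hc0, hc1⟩ := carry_bounds (ds.drop m)
    rw [htk, valI_append_singleton]
    set M' : Int := valI (ds.take (m-1)) with hM'
    unfold roundAt
    simp only
    have hp : (0:Int) < 10 ^ (j+1) := by positivity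
    have e1 : PySem.Int.floordiv (10 ^ (j+1) : Int) 2 = 5 * 10 ^ j := by
      rw [PySem.Int.floordiv_eq_ediv_of_pos (by norm_num : (0:Int) < 2)]
      have : (10:Int) ^ (j+1) = 2 * (5 * 10 ^ j) := by rw [pow_succ]; ring
      rw [this, Int.mul_ediv_cancel_left _ (by norm_num)]
    have e2 : (10*M' + r + c) * 10 ^ j + 5 * 10 ^ j = (10 ^ j) * (10*M' + (r + c + 5)) := by ring
    have e3 : PySem.Int.floordiv ((10 ^ j) * (10*M' + (r + c + 5))) (10 ^ (j+1))
        = M' + (if 5 ≤ r + c then 1 else 0) := by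
      rw [PySem.Int.floordiv_eq_ediv_of_pos hp]
      have h10 : (10:Int) ^ (j+1) = 10 ^ j * 10 := by rw [pow_succ]
      rw [h10, Int.mul_ediv_mul_of_pos _ _ (by positivity)]
      split_ifs with h5 <;> omega
    rw [e1, e2, e3]
    have hLsub : ds.length - (j+1) = m - 1 := by omega
    rw [hLsub, hdr]
    have hcnew : carry (r :: ds.drop m) = if 5 ≤ r + c then 1 else 0 := rfl
    rw [hcnew, ← hM']
    norm_num [pow_succ]

lemma toChars_eq_toDigits (value : Int) (h : 0 ≤ value) :
    PySem.Int.toChars value = Nat.toDigits 10 value.toNat := by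
  simp [PySem.Int.toChars, not_lt.2 h]

lemma valI_single (d : Int) : valI [d] = d := by simp [valI]

-- the common value of both programs, established separately for each port
lemma rounders_eq (value : Int) :
    ∀ (d0 : Int) (t : List Int) (cs : List Char),
      PySem.Int.toChars value = cs →
      cs.map (fun c => (PySem.Int.ofChars? [c]).getD 0) = d0 :: t →
      (∀ d ∈ d0 :: t, 0 ≤ d ∧ d ≤ 9) → valI (d0 :: t) = value → t.length ≤ 9 →
      rounders value = (d0 + carry t) * 10 ^ t.length ∧
      rounders_alt value = (d0 + carry t) * 10 ^ t.length := by
  intro d0 t cs hcs hmap hb hv hlen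
  have hlcs : cs.length = t.length + 1 := by
    have := congrArg List.length hmap
    simpa using this
  obtain ⟨hd0, hd9⟩ := hb d0 (by simp)
  obtain ⟨hc0, hc1⟩ := carry_bounds t
  constructor
  · -- port A
    unfold rounders
    dsimp only
    rw [PySem.Int.toList_toStr, hcs, hmap]
    have hL : ((d0 :: t).length : Int) - 1 = (t.length : Int) := by
      simp only [List.length_cons]; omega
    rw [hL, loopA_spec t d0]
    have hjoin : PySem.Chars.join []
        (((d0 + carry t) :: List.replicate t.length 0).map (fun d => PySem.Int.toChars d))
        = PySem.Int.toChars (d0 + carry t) ++ List.replicate t.length '0' := by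
      show List.intercalate [] _ = _
      rw [intercalate_nil_flatten, List.map_cons, List.flatten_cons, flatten_replicate_zero]
    rw [hjoin, parse_head_zeros (d0 + carry t) t.length (by omega) (by omega) hlen]
    rfl
  · -- port B
    unfold rounders_alt
    have hlen' : PySem.Str.len (PySem.Int.toStr value) = ((t.length : Int) + 1) := by
      rw [PySem.Str.len_eq, PySem.Int.toList_toStr, hcs, hlcs]
      push_cast; ring
    rw [hlen']
    have hrange : ((t.length : Int) + 1 - 1) = (t.length : Int) := by ring
    rw [hrange]
    rw [foldl_ignore_index roundAt (PySem.List.pyRange 0 (t.length : Int) 1) (value, 10)]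
    rw [PySem.List.length_pyRange_one]
    have htn : ((t.length : Int) - 0).toNat = t.length := by omega
    rw [htn]
    have hv' : value = valI (d0 :: t) := hv.symm
    rw [hv']
    have hinv := loopB_inv (d0 :: t) hb t.length (by simp)
    rw [hinv]
    have h1 : (d0 :: t).length - t.length = 1 := by simp
    rw [h1]
    rw [show List.take 1 (d0 :: t) = [d0] from by simp, valI_single,
        show List.drop 1 (d0 :: t) = t from rfl]

-- ===== VERDICT (by name: the statement is the Claim_ definition above) =====
theorem rounders_spec : Claim_equal_rounders := by
  intro value hdom hpre
  unfold Spec_rounders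
  obtain ⟨cs, hcs, hne, hmem, hval⟩ := toChars_spec value hpre
  obtain ⟨c0, crest, rfl⟩ := List.exists_cons_of_ne_nil hne
  have hb : ∀ d ∈ (c0 :: crest).map (fun c => (PySem.Int.ofChars? [c]).getD 0), 0 ≤ d ∧ d ≤ 9 := by
    intro d hd
    obtain ⟨c, hc, rfl⟩ := List.mem_map.1 hd
    rw [ofChars_digit c (hmem c hc)]
    exact digit_bounds c (hmem c hc)
  have hv : valI ((c0 :: crest).map (fun c => (PySem.Int.ofChars? [c]).getD 0)) = value := by
    rw [valI_map_eq_valC _ hmem, hval]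
  have hlen : (c0 :: crest).length ≤ 10 := by
    have hub : value.toNat < 10 ^ 10 := by
      have : Dom_rounders value → value ≤ 2147483648 := by
        unfold Dom_rounders pvDomInt
        intro h
        simp at h
        omega
      have h2 := this hdom
      omega
    have := Nat.toDigits_length 10 value.toNat 10 (by norm_num) hub
    rw [← hcs, toChars_eq_toDigits value hpre] at *
    omega
  rcases hmd : (c0 :: crest).map (fun c => (PySem.Int.ofChars? [c]).getD 0) with _ | ⟨d0, t⟩
  · exact absurd (congrArg List.length hmd) (by simp)
  · rw [hmd] at hb hv
    have hlt : t.length ≤ 9 := by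
      have h := congrArg List.length hmd
      simp at h hlen
      omega
    obtain ⟨hA, hB⟩ := rounders_eq value d0 t (c0 :: crest) hcs hmd hb hv hlt
    rw [hA, hB]
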